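-- pv_equiv track=rewrite | github.com/deepthisri2185/password-generator | simplepasswordgenerator.py | has_no_linear_sequences
-- ===== SOURCE A (Python) =====
-- def has_no_linear_sequences(pw: str, run_len: int = 3) -> bool:
--     # Avoid obvious ascending/descending sequences like abc, 123, cba, 987
--     if len(pw) < run_len:
--         return True
--     for i in range(len(pw) - run_len + 1):
--         chunk = pw[i : i + run_len]
--         diffs = [ord(chunk[j + 1]) - ord(chunk[j]) for j in range(len(chunk) - 1)]
--         if all(d == 1 for d in diffs) or all(d == -1 for d in diffs):
--             return False
--     return True
-- ===== SOURCE B (Python) =====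
-- def has_no_linear_sequences(pw: str, run_len: int = 3) -> bool:
--     # One pass: track the lengths of the ascending and descending runs
--     # ending at the current character instead of re-slicing every window.
--     if len(pw) < run_len:
--         return True
--     asc = desc = 1
--     for prev, cur in zip(pw, pw[1:]):
--         d = ord(cur) - ord(prev)
--         asc = asc + 1 if d == 1 else 1
--         desc = desc + 1 if d == -1 else 1
--         if asc >= run_len or desc >= run_len:
--             return False
--     return True
-- ===== Notes on version B (the rewrite author's own statement) =====
-- stated objective: faster
-- what changed: Replaced A's per-window work (a fresh run_len-slice and diff list for every start index) with a single left-to-right scan that maintains ascending and descending run-length counters and stops at the first run of length run_len.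
-- intended difference: For run_len <= 1 with a password of at most one character (run_len <= len(pw) <= 1), A returns False because all() over an empty diff list is vacuously true, flagging a single-character password as containing a linear sequence; B returns True, the intended value since no ascending or descending run of characters exists in such a password. — e.g. on has_no_linear_sequences("a", 1): A returns false, B returns true
import Mathlib
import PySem

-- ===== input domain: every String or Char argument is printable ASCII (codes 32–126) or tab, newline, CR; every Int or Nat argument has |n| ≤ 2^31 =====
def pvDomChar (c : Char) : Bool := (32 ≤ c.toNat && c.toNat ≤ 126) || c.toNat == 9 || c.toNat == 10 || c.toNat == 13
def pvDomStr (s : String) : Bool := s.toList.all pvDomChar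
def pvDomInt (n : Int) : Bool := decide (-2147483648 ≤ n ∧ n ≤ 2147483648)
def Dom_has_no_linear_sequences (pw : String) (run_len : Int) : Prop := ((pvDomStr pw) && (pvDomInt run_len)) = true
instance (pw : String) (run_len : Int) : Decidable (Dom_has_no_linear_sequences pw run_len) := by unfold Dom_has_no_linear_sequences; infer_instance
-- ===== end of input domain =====

-- B replaces A's per-window slicing with one scan keeping ascending/descending run counters (faster);
-- B differs from A only on the degenerate inputs described at D_ below.

-- ===== PORT A =====
-- the for-loop of A, `for i in range(stop)` with early return, as index recursion
-- one iteration's test: chunk = pw[i:i+run_len], diffs, all(d==1) or all(d==-1)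
def pvACond (cs : List Char) (run_len i : Int) : Bool :=
  let chunk := PySem.List.slice cs (some i) (some (i + run_len))
  let diffs := (PySem.List.pyRange 0 ((chunk.length : Int) - 1) 1).map
    (fun j => ((PySem.List.pyGetD chunk (j + 1) 'A').toNat : Int)
              - ((PySem.List.pyGetD chunk j 'A').toNat : Int))
  (diffs.all (fun d => d == 1)) || (diffs.all (fun d => d == -1))

def pvALoop (cs : List Char) (run_len stop i : Int) : Bool :=
  if _h : i < stop then
    if pvACond cs run_len i then false
    else pvALoop cs run_len stop (i + 1)
  else true
termination_by (stop - i).toNat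
decreasing_by omega

def has_no_linear_sequences (pw : String) (run_len : Int) : Bool :=
  if PySem.Str.len pw < run_len then true
  else pvALoop pw.toList run_len (PySem.Str.len pw - run_len + 1) 0

-- ===== PORT B =====
-- the `for prev, cur in zip(pw, pw[1:])` loop of B: previous char, ascending and descending counters
def pvBLoop (run_len : Int) : Char → List Char → Int → Int → Bool
  | _, [], _, _ => true
  | p, c :: rest, asc, desc =>
    let d : Int := (c.toNat : Int) - (p.toNat : Int)
    let asc' := if d == 1 then asc + 1 else 1
    let desc' := if d == -1 then desc + 1 else 1
    if run_len ≤ asc' || run_len ≤ desc' then false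
    else pvBLoop run_len c rest asc' desc'

def has_no_linear_sequences_alt (pw : String) (run_len : Int) : Bool :=
  if PySem.Str.len pw < run_len then true
  else match pw.toList with
    | [] => true                     -- zip of an empty string: loop body never runs
    | c :: rest => pvBLoop run_len c rest 1 1

-- ===== PRECONDITION & SPEC =====
-- For run_len <= 1 with a password of at most one character (run_len <= len(pw) <= 1), A returns
-- false because all() over an empty diff list is vacuously true, flagging a single-character password as containing
-- a linear sequence; B returns true, the intended value since no ascending or descending run of
-- characters exists in such a password.
def D_has_no_linear_sequences (pw : String) (run_len : Int) : Prop :=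
  run_len ≤ 1 ∧ run_len ≤ PySem.Str.len pw ∧ PySem.Str.len pw ≤ 1
instance (pw : String) (run_len : Int) : Decidable (D_has_no_linear_sequences pw run_len) := by unfold D_has_no_linear_sequences; infer_instance

def Spec_has_no_linear_sequences (pw : String) (run_len : Int) (out : Bool) : Prop := ¬ D_has_no_linear_sequences pw run_len → out = has_no_linear_sequences_alt pw run_len
instance (pw : String) (run_len : Int) (out : Bool) : Decidable (Spec_has_no_linear_sequences pw run_len out) := by unfold Spec_has_no_linear_sequences; infer_instance

def pvDiffWitness_has_no_linear_sequences : String × Int := ("a", 1)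
def pvDiffWitnessOut_has_no_linear_sequences : Bool × Bool := (false, true)

-- ===== CLAIM (what is proved, stated in full; the proofs are below) =====
def Claim_unchanged_has_no_linear_sequences : Prop := ∀ (pw : String) (run_len : Int), Dom_has_no_linear_sequences pw run_len → Spec_has_no_linear_sequences pw run_len (has_no_linear_sequences pw run_len)
def Claim_changed_has_no_linear_sequences : Prop := Dom_has_no_linear_sequences (pvDiffWitness_has_no_linear_sequences.1) (pvDiffWitness_has_no_linear_sequences.2) ∧ D_has_no_linear_sequences (pvDiffWitness_has_no_linear_sequences.1) (pvDiffWitness_has_no_linear_sequences.2) ∧ has_no_linear_sequences (pvDiffWitness_has_no_linear_sequences.1) (pvDiffWitness_has_no_linear_sequences.2) = pvDiffWitnessOut_has_no_linear_sequences.1 ∧ has_no_linear_sequences_alt (pvDiffWitness_has_no_linear_sequences.1) (pvDiffWitness_has_no_linear_sequences.2) = pvDiffWitnessOut_has_no_linear_sequences.2 ∧ pvDiffWitnessOut_has_no_linear_sequences.1 ≠ pvDiffWitnessOut_has_no_linear_sequences.2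
def Claim_exact_has_no_linear_sequences : Prop := ∀ (pw : String) (run_len : Int), Dom_has_no_linear_sequences pw run_len → D_has_no_linear_sequences pw run_len → has_no_linear_sequences pw run_len ≠ has_no_linear_sequences_alt pw run_len

-- ===== LEMMAS AND PROOFS =====

-- difference of adjacent character codes at position j
def pvD (cs : List Char) (j : Nat) : Int :=
  ((cs.getD (j + 1) 'A').toNat : Int) - ((cs.getD j 'A').toNat : Int)

-- ascending window of length R starting at i
def pvAsc (cs : List Char) (i R : Nat) : Prop := ∀ k, k + 1 < R → pvD cs (i + k) = 1
def pvDesc (cs : List Char) (i R : Nat) : Prop := ∀ k, k + 1 < R → pvD cs (i + k) = -1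
def pvBad (cs : List Char) (R : Nat) : Prop :=
  ∃ i, i + R ≤ cs.length ∧ (pvAsc cs i R ∨ pvDesc cs i R)

-- length of the maximal ascending (resp. descending) run ending at index t
def pvAscLen (cs : List Char) : Nat → Nat
  | 0 => 1
  | t + 1 => if pvD cs t = 1 then pvAscLen cs t + 1 else 1
def pvDescLen (cs : List Char) : Nat → Nat
  | 0 => 1
  | t + 1 => if pvD cs t = -1 then pvDescLen cs t + 1 else 1

lemma pvALoop_false_iff (cs : List Char) (r stop : Int) (i : Int) :
    pvALoop cs r stop i = false ↔ ∃ j, i ≤ j ∧ j < stop ∧ pvACond cs r j = true := by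
  generalize hfuel : (stop - i).toNat = n
  induction n generalizing i with
  | zero =>
    rw [pvALoop, dif_neg (by omega)]
    constructor
    · intro h; exact absurd h (by simp)
    · rintro ⟨j, h1, h2, _⟩; omega
  | succ n ih =>
    rw [pvALoop, dif_pos (by omega)]
    split
    · rename_i hcond
      exact ⟨fun _ => ⟨i, le_refl i, by omega, hcond⟩, fun _ => rfl⟩
    · rename_i hcond
      rw [ih (i + 1) (by omega)]
      constructor
      · rintro ⟨j, h1, h2, h3⟩; exact ⟨j, by omega, h2, h3⟩
      · rintro ⟨j, h1, h2, h3⟩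
        rcases eq_or_lt_of_le h1 with rfl | hlt
        · exact absurd h3 hcond
        · exact ⟨j, by omega, h2, h3⟩

-- A's loop returns false for run_len ≤ 1 whenever it runs at all (empty/1-char chunk, vacuous all())
lemma pvALoop_false_of_small (cs : List Char) (r : Int) (hr : r ≤ 1) (hn : r ≤ (cs.length : Int)) :
    pvALoop cs r ((cs.length : Int) - r + 1) 0 = false := by
  rw [pvALoop_false_iff]
  by_cases h0 : 0 ≤ r
  · refine ⟨0, le_refl 0, by omega, ?_⟩
    unfold pvACond
    simp only [zero_add, PySem.List.slice_zero_start, Bool.or_eq_true, List.all_eq_true,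
      List.forall_mem_map, PySem.List.mem_pyRange_one, beq_iff_eq]
    left
    intro j hj
    have hch : (PySem.List.slice cs none (some r)).length ≤ 1 := by
      rw [PySem.List.slice_to cs h0]
      simp
      omega
    exact absurd hj.2 (by omega)
  · refine ⟨-r, by omega, by omega, ?_⟩
    unfold pvACond
    have hch : PySem.List.slice cs (some (-r)) (some (-r + r)) = [] := by
      rw [show -r + r = 0 by ring]
      rw [PySem.List.slice_toNat cs (by omega) (by omega)]
      simp
    rw [hch]
    simp only [Bool.or_eq_true, List.all_eq_true, List.forall_mem_map,
      PySem.List.mem_pyRange_one, beq_iff_eq]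
    left
    intro j hj
    exact absurd hj.2 (by simp; omega)

lemma pvChunk_getD (cs : List Char) (i R m : Nat) (hm : m < R) (h : i + R ≤ cs.length) :
    ((cs.drop i).take R).getD m 'A' = cs.getD (i + m) 'A' := by
  simp [List.getD_eq_getElem?_getD, hm, List.getElem?_drop]

-- both "all d == c" tests over the window's diff list, in one lemma
lemma pvDiffsAll_iff (cs : List Char) (R i : Nat) (c : Int) (hR : 2 ≤ R) (h : i + R ≤ cs.length) :
    (((PySem.List.pyRange 0 (((((cs.drop i).take R).length : Int)) - 1) 1).map
       (fun j => ((PySem.List.pyGetD ((cs.drop i).take R) (j + 1) 'A').toNat : Int)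
                 - ((PySem.List.pyGetD ((cs.drop i).take R) j 'A').toNat : Int))).all
       (fun d => d == c)) = true
    ↔ (∀ k, k + 1 < R → pvD cs (i + k) = c) := by
  have hlen : ((cs.drop i).take R).length = R := by simp; omega
  rw [hlen]
  simp only [List.all_eq_true, List.forall_mem_map, PySem.List.mem_pyRange_one, beq_iff_eq]
  constructor
  · intro hall k hk
    have h0 : (0:Int) ≤ (k:Int) := by positivity
    have h1 : (k:Int) < (R:Int) - 1 := by omega
    have := hall (k:Int) ⟨h0, h1⟩
    rw [show ((k:Int) + 1) = ((k+1 : Nat) : Int) by push_cast; ring] at this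
    rw [PySem.List.pyGetD_natCast, PySem.List.pyGetD_natCast] at this
    rw [pvChunk_getD cs i R (k+1) (by omega) h, pvChunk_getD cs i R k (by omega) h] at this
    simpa [pvD, Nat.add_assoc] using this
  · intro hall j hj
    obtain ⟨hj0, hj1⟩ := hj
    obtain ⟨k, rfl⟩ : ∃ k : Nat, (j : Int) = (k : Int) := ⟨j.toNat, (Int.toNat_of_nonneg hj0).symm⟩
    have hk : k + 1 < R := by omega
    rw [show ((k:Int) + 1) = ((k+1 : Nat) : Int) by push_cast; ring]
    rw [PySem.List.pyGetD_natCast, PySem.List.pyGetD_natCast]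
    rw [pvChunk_getD cs i R (k+1) (by omega) h, pvChunk_getD cs i R k (by omega) h]
    have := hall k hk
    simp [pvD, Nat.add_assoc] at this ⊢
    omega

lemma pvAbad_iff (cs : List Char) (R i : Nat) (hR : 2 ≤ R) (h : i + R ≤ cs.length) :
    pvACond cs (R : Int) (i : Int) = true ↔ (pvAsc cs i R ∨ pvDesc cs i R) := by
  unfold pvACond
  have hchunk : PySem.List.slice cs (some (i:Int)) (some ((i:Int)+(R:Int))) = (cs.drop i).take R :=
    PySem.List.slice_natCast_add cs i R
  simp only [hchunk, Bool.or_eq_true]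
  rw [pvDiffsAll_iff cs R i 1 hR h, pvDiffsAll_iff cs R i (-1) hR h]
  rfl

lemma pvA_false_iff (cs : List Char) (R : Nat) (hR : 2 ≤ R) (hn : R ≤ cs.length) :
    pvALoop cs (R : Int) ((cs.length : Int) - (R : Int) + 1) 0 = false
    ↔ pvBad cs R := by
  rw [pvALoop_false_iff]
  constructor
  · rintro ⟨i, h0, hi, hc⟩
    obtain ⟨k, rfl⟩ : ∃ k : Nat, i = (k:Int) := ⟨i.toNat, (Int.toNat_of_nonneg h0).symm⟩
    have hk : k + R ≤ cs.length := by omega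
    exact ⟨k, hk, (pvAbad_iff cs R k hR hk).mp hc⟩
  · rintro ⟨k, hk, hc⟩
    exact ⟨(k:Int), by positivity, by omega, (pvAbad_iff cs R k hR hk).mpr hc⟩

lemma pvAscLen_pos (cs : List Char) (t : Nat) : 1 ≤ pvAscLen cs t := by
  cases t <;> simp [pvAscLen] <;> split <;> omega

lemma pvDescLen_pos (cs : List Char) (t : Nat) : 1 ≤ pvDescLen cs t := by
  cases t <;> simp [pvDescLen] <;> split <;> omega

lemma pvAsc_prev (cs : List Char) (u : Nat) (h : 2 ≤ pvAscLen cs u) :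
    1 ≤ u ∧ pvD cs (u - 1) = 1 ∧ pvAscLen cs (u - 1) = pvAscLen cs u - 1 := by
  cases u with
  | zero => simp [pvAscLen] at h
  | succ t =>
    simp only [pvAscLen] at h ⊢
    split at h
    · rename_i hd; simp only [Nat.add_sub_cancel]; exact ⟨by omega, hd, by simp [hd]⟩
    · omega

lemma pvDesc_prev (cs : List Char) (u : Nat) (h : 2 ≤ pvDescLen cs u) :
    1 ≤ u ∧ pvD cs (u - 1) = -1 ∧ pvDescLen cs (u - 1) = pvDescLen cs u - 1 := by
  cases u with
  | zero => simp [pvDescLen] at h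
  | succ t =>
    simp only [pvDescLen] at h ⊢
    split at h
    · rename_i hd; simp only [Nat.add_sub_cancel]; exact ⟨by omega, hd, by simp [hd]⟩
    · omega

-- a long run ending at u contains a window
lemma pvWindow_of_ascRun (cs : List Char) (L u : Nat) (h1 : 1 ≤ L) (h : L ≤ pvAscLen cs u) :
    L ≤ u + 1 ∧ pvAsc cs (u + 1 - L) L := by
  induction L generalizing u with
  | zero => omega
  | succ L ih =>
    rcases Nat.eq_zero_or_pos L with rfl | hL
    · exact ⟨by omega, fun k hk => by omega⟩
    · have h2 : 2 ≤ pvAscLen cs u := by omega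
      obtain ⟨hu, hd, hprev⟩ := pvAsc_prev cs u h2
      obtain ⟨hLu, hAsc⟩ := ih (u - 1) hL (by omega)
      refine ⟨by omega, fun k hk => ?_⟩
      rcases Nat.lt_or_ge (k + 1) L with hkL | hkL
      · have := hAsc k hkL
        have he : u - 1 + 1 - L = u + 1 - (L + 1) := by omega
        rwa [he] at this
      · have hkeq : k = L - 1 := by omega
        have he : u + 1 - (L + 1) + k = u - 1 := by omega
        rw [he]; exact hd

lemma pvWindow_of_descRun (cs : List Char) (L u : Nat) (h1 : 1 ≤ L) (h : L ≤ pvDescLen cs u) :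
    L ≤ u + 1 ∧ pvDesc cs (u + 1 - L) L := by
  induction L generalizing u with
  | zero => omega
  | succ L ih =>
    rcases Nat.eq_zero_or_pos L with rfl | hL
    · exact ⟨by omega, fun k hk => by omega⟩
    · have h2 : 2 ≤ pvDescLen cs u := by omega
      obtain ⟨hu, hd, hprev⟩ := pvDesc_prev cs u h2
      obtain ⟨hLu, hDesc⟩ := ih (u - 1) hL (by omega)
      refine ⟨by omega, fun k hk => ?_⟩
      rcases Nat.lt_or_ge (k + 1) L with hkL | hkL
      · have := hDesc k hkL
        have he : u - 1 + 1 - L = u + 1 - (L + 1) := by omega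
        rwa [he] at this
      · have hkeq : k = L - 1 := by omega
        have he : u + 1 - (L + 1) + k = u - 1 := by omega
        rw [he]; exact hd

-- a window yields a long run ending at its last index
lemma pvAscRun_of_window (cs : List Char) (i R L : Nat) (hA : pvAsc cs i R) (h1 : 1 ≤ L)
    (hLR : L ≤ R) : L ≤ pvAscLen cs (i + L - 1) := by
  induction L with
  | zero => omega
  | succ L ih =>
    rcases Nat.eq_zero_or_pos L with rfl | hL
    · simpa using pvAscLen_pos cs i
    · have hd : pvD cs (i + L - 1) = 1 := by
        have := hA (L - 1) (by omega)
        have he : i + (L - 1) = i + L - 1 := by omega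
        rwa [he] at this
      have he : i + (L + 1) - 1 = (i + L - 1) + 1 := by omega
      rw [he]
      simp only [pvAscLen, hd, if_pos]
      have := ih (by omega) (by omega)
      omega

lemma pvDescRun_of_window (cs : List Char) (i R L : Nat) (hA : pvDesc cs i R) (h1 : 1 ≤ L)
    (hLR : L ≤ R) : L ≤ pvDescLen cs (i + L - 1) := by
  induction L with
  | zero => omega
  | succ L ih =>
    rcases Nat.eq_zero_or_pos L with rfl | hL
    · simpa using pvDescLen_pos cs i
    · have hd : pvD cs (i + L - 1) = -1 := by
        have := hA (L - 1) (by omega)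
        have he : i + (L - 1) = i + L - 1 := by omega
        rwa [he] at this
      have he : i + (L + 1) - 1 = (i + L - 1) + 1 := by omega
      rw [he]
      simp only [pvDescLen, hd, if_pos]
      have := ih (by omega) (by omega)
      omega

lemma pvBLoop_iff (cs : List Char) (R : Nat) (hR : 2 ≤ R) :
    ∀ (suf : List Char) (t : Nat) (asc desc : Int),
      suf = cs.drop (t + 1) → t < cs.length →
      asc = (pvAscLen cs t : Int) → desc = (pvDescLen cs t : Int) →
      asc < (R : Int) → desc < (R : Int) →
      (pvBLoop (R : Int) (cs.getD t 'A') suf asc desc = false ↔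
        ∃ u, t < u ∧ u < cs.length ∧ (R ≤ pvAscLen cs u ∨ R ≤ pvDescLen cs u)) := by
  intro suf
  induction suf with
  | nil =>
    intro t asc desc hsuf ht hasc hdesc ha hd
    have hlen : cs.length ≤ t + 1 := by
      by_contra hc
      have := List.drop_eq_nil_iff.mp hsuf.symm
      omega
    simp only [pvBLoop]
    constructor
    · intro h; exact absurd h (by simp)
    · rintro ⟨u, h1, h2, _⟩; omega
  | cons c rest ih =>
    intro t asc desc hsuf ht hasc hdesc ha hd
    have hget : cs[t + 1]? = some c := by
      have h0 := congrArg (fun l => l[0]?) hsuf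
      simpa [List.getElem?_drop] using h0.symm
    have ht1 : t + 1 < cs.length := (List.getElem?_eq_some_iff.mp hget).1
    have hrest : rest = cs.drop (t + 2) := by
      have h0 := congrArg List.tail hsuf
      simpa [List.tail_drop] using h0
    have hgetD : cs.getD (t + 1) 'A' = c := by
      simp [List.getD_eq_getElem?_getD, hget]
    have hdval : ((c.toNat : Int) - ((cs.getD t 'A').toNat : Int)) = pvD cs t := by
      simp only [pvD, hgetD]
    have hasc' : (if ((c.toNat : Int) - ((cs.getD t 'A').toNat : Int)) == 1 then asc + 1 else 1)
        = (pvAscLen cs (t + 1) : Int) := by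
      rw [hdval, hasc]
      by_cases h1 : pvD cs t = 1 <;> simp [pvAscLen, h1]
    have hdesc' : (if ((c.toNat : Int) - ((cs.getD t 'A').toNat : Int)) == -1 then desc + 1 else 1)
        = (pvDescLen cs (t + 1) : Int) := by
      rw [hdval, hdesc]
      by_cases h1 : pvD cs t = -1 <;> simp [pvDescLen, h1]
    simp only [pvBLoop, hasc', hdesc']
    split
    · rename_i hcond
      simp only [decide_eq_true_eq, Bool.or_eq_true] at hcond
      constructor
      · intro _
        refine ⟨t + 1, by omega, ht1, ?_⟩
        rcases hcond with h | h
        · exact Or.inl (by exact_mod_cast h)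
        · exact Or.inr (by exact_mod_cast h)
      · intro _; rfl
    · rename_i hcond
      simp only [decide_eq_true_eq, Bool.or_eq_true, not_or] at hcond
      have hna : ¬ (R ≤ pvAscLen cs (t + 1)) := by
        intro h; exact hcond.1 (by exact_mod_cast h)
      have hnd : ¬ (R ≤ pvDescLen cs (t + 1)) := by
        intro h; exact hcond.2 (by exact_mod_cast h)
      rw [← hgetD]
      rw [ih (t + 1) (pvAscLen cs (t + 1) : Int) (pvDescLen cs (t + 1) : Int)
        (by rw [hrest]) ht1 rfl rfl (by omega) (by omega)]
      constructor
      · rintro ⟨u, h1, h2, h3⟩; exact ⟨u, by omega, h2, h3⟩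
      · rintro ⟨u, h1, h2, h3⟩
        rcases Nat.eq_or_lt_of_le h1 with heq | hlt
        · exact absurd h3 (by rw [← heq]; tauto)
        · exact ⟨u, hlt, h2, h3⟩

lemma pvB_false_iff (c : Char) (rest : List Char) (R : Nat) (hR : 2 ≤ R)
    (hn : R ≤ (c :: rest).length) :
    pvBLoop (R : Int) c rest 1 1 = false ↔ pvBad (c :: rest) R := by
  have h0 := pvBLoop_iff (c :: rest) R hR rest 0 1 1 (by simp) (by simp)
    (by simp [pvAscLen]) (by simp [pvDescLen]) (by omega) (by omega)
  simp only [List.getD_cons_zero] at h0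
  rw [h0]
  constructor
  · rintro ⟨u, hu0, hun, h | h⟩
    · obtain ⟨hRu, hA⟩ := pvWindow_of_ascRun (c :: rest) R u (by omega) h
      exact ⟨u + 1 - R, by omega, Or.inl hA⟩
    · obtain ⟨hRu, hD⟩ := pvWindow_of_descRun (c :: rest) R u (by omega) h
      exact ⟨u + 1 - R, by omega, Or.inr hD⟩
  · rintro ⟨i, hiR, hA | hD⟩
    · refine ⟨i + R - 1, by omega, by omega, Or.inl ?_⟩
      have := pvAscRun_of_window (c :: rest) i R R hA (by omega) le_rfl
      exact this
    · refine ⟨i + R - 1, by omega, by omega, Or.inr ?_⟩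
      have := pvDescRun_of_window (c :: rest) i R R hD (by omega) le_rfl
      exact this

-- B's loop rejects at its very first step whenever run_len ≤ 1 (a counter is already ≥ 1)
lemma pvBLoop_false_of_small (r : Int) (hr : r ≤ 1) (c d : Char) (rest : List Char) :
    pvBLoop r c (d :: rest) 1 1 = false := by
  simp [pvBLoop]
  intro h1 _
  split at h1 <;> omega

-- ===== VERDICT (by name: the statement is the Claim_ definition above) =====
theorem has_no_linear_sequences_spec : Claim_unchanged_has_no_linear_sequences := by
  intro pw run_len _ hnD
  unfold has_no_linear_sequences has_no_linear_sequences_alt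
  rw [PySem.Str.len_eq]
  by_cases hlt : ((pw.toList.length : Int)) < run_len
  · rw [if_pos hlt, if_pos hlt]
  · rw [if_neg hlt, if_neg hlt]
    by_cases hr1 : run_len ≤ 1
    · have hlen2 : 2 ≤ pw.toList.length := by
        unfold D_has_no_linear_sequences at hnD
        rw [PySem.Str.len_eq] at hnD
        by_contra hc
        exact hnD ⟨hr1, by omega, by omega⟩
      rw [pvALoop_false_of_small pw.toList run_len hr1 (by omega)]
      rcases hpw : pw.toList with _ | ⟨c, rest⟩
      · rw [hpw] at hlen2; simp at hlen2
      · rcases rest with _ | ⟨d, rest'⟩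
        · rw [hpw] at hlen2; simp at hlen2
        · exact (pvBLoop_false_of_small run_len hr1 c d rest').symm
    · have hcast : run_len = ((run_len.toNat : Nat) : Int) := by omega
      have hR : 2 ≤ run_len.toNat := by omega
      have hn : run_len.toNat ≤ pw.toList.length := by omega
      rw [hcast]
      rcases hpw : pw.toList with _ | ⟨c, rest⟩
      · rw [hpw] at hn; simp at hn; omega
      · rw [hpw] at hn
        have hA := pvA_false_iff (c :: rest) run_len.toNat hR hn
        have hB := pvB_false_iff c rest run_len.toNat hR hn
        have key : ∀ (a b : Bool), (a = false ↔ pvBad (c :: rest) run_len.toNat) →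
            (b = false ↔ pvBad (c :: rest) run_len.toNat) → a = b := by
          intro a b h1 h2
          cases a with
          | true =>
            cases b with
            | true => rfl
            | false => exact absurd (h1.mpr (h2.mp rfl)) (by simp)
          | false =>
            cases b with
            | true => exact absurd (h2.mpr (h1.mp rfl)) (by simp)
            | false => rfl
        exact key _ _ hA hB

theorem has_no_linear_sequences_changed : Claim_changed_has_no_linear_sequences := by
  unfold Claim_changed_has_no_linear_sequences
  refine ⟨by decide, by decide, ?_, by decide, by decide⟩
  show has_no_linear_sequences "a" 1 = false
  unfold has_no_linear_sequences
  rw [if_neg (by decide), pvALoop, dif_pos (by decide), if_pos (by decide)]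

theorem has_no_linear_sequences_tight : Claim_exact_has_no_linear_sequences := by
  intro pw run_len _ hD
  obtain ⟨hr1, hrl, hl1⟩ := hD
  rw [PySem.Str.len_eq] at hrl hl1
  unfold has_no_linear_sequences has_no_linear_sequences_alt
  rw [PySem.Str.len_eq, if_neg (by omega), if_neg (by omega)]
  rw [pvALoop_false_of_small pw.toList run_len hr1 hrl]
  rcases hpw : pw.toList with _ | ⟨c, rest⟩
  · simp
  · rcases rest with _ | ⟨d, rest'⟩
    · simp [pvBLoop]
    · exfalso; rw [hpw] at hl1; simp at hl1; omega
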